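-- pv_equiv track=rewrite | github.com/NielXu/algo | sorting/radix.py | _radix_sort_helper
-- ===== SOURCE A (Python) =====
-- def _radix_sort_helper(lst, place):
--     """ (list of int, int) -> list of int
--     Given a list and the place that is going to be sorted,
--     return the list that is sorted by bins in ascending order.
--     """
--     bins = [[], [], [], [], [], [], [], [], [], []]
--
--     # put all elements of cloned list in bins
--     for num in lst:
--
--         # find digit and put in bin
--         digit = num // (10)**(place - 1) % 10
--         bins[digit].append(num)
--
--     # put nums in bin out to sorted list
--     sorted_list = (bins[0] + bins[1] + bins[2] + bins[3] +
--                    bins[4] + bins[5] + bins[6] + bins[7] +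
--                    bins[8] + bins[9])
--
--     # return the list
--     return sorted_list
-- ===== SOURCE B (Python) =====
-- def _radix_sort_helper(lst, place):
--     """Stable one-digit bucket pass, written as ten filter sweeps:
--     for each digit 0..9 in order, append the elements with that digit."""
--     p = 10 ** (place - 1)
--     out = []
--     for d in range(10):
--         out.extend(num for num in lst if num // p % 10 == d)
--     return out
-- ===== Notes on version B (the rewrite author's own statement) =====
-- stated objective: simpler
-- what changed: Replaces the ten explicit bucket lists and their concatenation by ten in-order filter sweeps over the input that append each digit class directly to the output.
import Mathlib
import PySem

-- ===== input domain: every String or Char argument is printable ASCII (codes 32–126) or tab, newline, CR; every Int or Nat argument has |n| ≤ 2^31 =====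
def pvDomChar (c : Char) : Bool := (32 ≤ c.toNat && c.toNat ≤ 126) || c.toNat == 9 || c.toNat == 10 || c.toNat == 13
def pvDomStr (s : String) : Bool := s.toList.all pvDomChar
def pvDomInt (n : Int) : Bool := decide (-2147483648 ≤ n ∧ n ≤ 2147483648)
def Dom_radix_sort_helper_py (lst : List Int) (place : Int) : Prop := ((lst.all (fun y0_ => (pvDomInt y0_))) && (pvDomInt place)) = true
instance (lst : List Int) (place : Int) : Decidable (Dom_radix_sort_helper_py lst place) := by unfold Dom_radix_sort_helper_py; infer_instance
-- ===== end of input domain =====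

-- B rewrites the single bucket-distributing pass as ten in-order filter sweeps (simpler; same return value).

-- ===== PORT A =====
def radix_sort_helper_py (lst : List Int) (place : Int) : List Int :=
  let bins : List (List Int) := [[],[],[],[],[],[],[],[],[],[]]
  let bins := lst.foldl (fun bins num =>
      let digit := PySem.Int.mod (PySem.Int.floordiv num ((10:Int) ^ (place - 1).toNat)) 10
      bins.set digit.toNat (bins.getD digit.toNat [] ++ [num])) bins
  bins.getD 0 [] ++ bins.getD 1 [] ++ bins.getD 2 [] ++ bins.getD 3 [] ++
  bins.getD 4 [] ++ bins.getD 5 [] ++ bins.getD 6 [] ++ bins.getD 7 [] ++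
  bins.getD 8 [] ++ bins.getD 9 []

-- ===== PORT B =====
def radix_sort_helper_py_alt (lst : List Int) (place : Int) : List Int :=
  let p := (10:Int) ^ (place - 1).toNat
  (PySem.List.pyRange 0 10 1).foldl (fun out d =>
      out ++ lst.filter (fun num => PySem.Int.mod (PySem.Int.floordiv num p) 10 == d)) []

-- ===== PRECONDITION & SPEC =====
-- Pre_ excludes place ≤ 0: there Python's 10**(place-1) is a float and A raises TypeError indexing bins.
def Pre_radix_sort_helper_py (lst : List Int) (place : Int) : Prop := 1 ≤ place
instance (lst : List Int) (place : Int) : Decidable (Pre_radix_sort_helper_py lst place) := by unfold Pre_radix_sort_helper_py; infer_instance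
def pvWitness_radix_sort_helper_py : List Int × Int := ([170, 45, 75, -90, 2], 2)
def Spec_radix_sort_helper_py (lst : List Int) (place : Int) (out : List Int) : Prop := out = radix_sort_helper_py_alt lst place
instance (lst : List Int) (place : Int) (out : List Int) : Decidable (Spec_radix_sort_helper_py lst place out) := by unfold Spec_radix_sort_helper_py; infer_instance

-- ===== CLAIM (what is proved, stated in full; the proofs are below) =====
def Claim_equal_radix_sort_helper_py : Prop := ∀ (lst : List Int) (place : Int), Dom_radix_sort_helper_py lst place → Pre_radix_sort_helper_py lst place → Spec_radix_sort_helper_py lst place (radix_sort_helper_py lst place)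

-- ===== LEMMAS AND PROOFS =====

-- digit of num in base-10 position given positive divisor p
def pvDg (num p : Int) : Int := PySem.Int.mod (PySem.Int.floordiv num p) 10

lemma pvDg_bounds (num p : Int) : 0 ≤ pvDg num p ∧ pvDg num p < 10 := by
  unfold pvDg
  rw [PySem.Int.mod_eq_emod_of_pos (by norm_num : (0:Int) < 10)]
  constructor
  · exact Int.emod_nonneg _ (by norm_num)
  · exact Int.emod_lt_of_pos _ (by norm_num)

-- A's distribution pass, characterised bucket-by-bucket as filters
lemma pvBinsA (p : Int) :
    ∀ (lst : List Int) (b0 b1 b2 b3 b4 b5 b6 b7 b8 b9 : List Int),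
    lst.foldl (fun bins num =>
        let digit := PySem.Int.mod (PySem.Int.floordiv num p) 10
        bins.set digit.toNat (bins.getD digit.toNat [] ++ [num]))
      [b0, b1, b2, b3, b4, b5, b6, b7, b8, b9]
    = [b0 ++ lst.filter (fun num => pvDg num p == 0),
       b1 ++ lst.filter (fun num => pvDg num p == 1),
       b2 ++ lst.filter (fun num => pvDg num p == 2),
       b3 ++ lst.filter (fun num => pvDg num p == 3),
       b4 ++ lst.filter (fun num => pvDg num p == 4),
       b5 ++ lst.filter (fun num => pvDg num p == 5),
       b6 ++ lst.filter (fun num => pvDg num p == 6),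
       b7 ++ lst.filter (fun num => pvDg num p == 7),
       b8 ++ lst.filter (fun num => pvDg num p == 8),
       b9 ++ lst.filter (fun num => pvDg num p == 9)] := by
  intro lst
  induction lst with
  | nil => intro b0 b1 b2 b3 b4 b5 b6 b7 b8 b9; simp
  | cons num rest ih =>
    intro b0 b1 b2 b3 b4 b5 b6 b7 b8 b9
    obtain ⟨h0, h1⟩ := pvDg_bounds num p
    have hd : pvDg num p = 0 ∨ pvDg num p = 1 ∨ pvDg num p = 2 ∨ pvDg num p = 3 ∨
        pvDg num p = 4 ∨ pvDg num p = 5 ∨ pvDg num p = 6 ∨ pvDg num p = 7 ∨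
        pvDg num p = 8 ∨ pvDg num p = 9 := by omega
    have hdg : PySem.Int.mod (PySem.Int.floordiv num p) 10 = pvDg num p := rfl
    rcases hd with h | h | h | h | h | h | h | h | h | h
    · simp only [List.foldl_cons]
      rw [hdg, h]
      show List.foldl _ [b0 ++ [num], b1, b2, b3, b4, b5, b6, b7, b8, b9] rest = _
      rw [ih]
      simp [h, List.append_assoc]
    · simp only [List.foldl_cons]
      rw [hdg, h]
      show List.foldl _ [b0, b1 ++ [num], b2, b3, b4, b5, b6, b7, b8, b9] rest = _
      rw [ih]
      simp [h, List.append_assoc]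
    · simp only [List.foldl_cons]
      rw [hdg, h]
      show List.foldl _ [b0, b1, b2 ++ [num], b3, b4, b5, b6, b7, b8, b9] rest = _
      rw [ih]
      simp [h, List.append_assoc]
    · simp only [List.foldl_cons]
      rw [hdg, h]
      show List.foldl _ [b0, b1, b2, b3 ++ [num], b4, b5, b6, b7, b8, b9] rest = _
      rw [ih]
      simp [h, List.append_assoc]
    · simp only [List.foldl_cons]
      rw [hdg, h]
      show List.foldl _ [b0, b1, b2, b3, b4 ++ [num], b5, b6, b7, b8, b9] rest = _
      rw [ih]
      simp [h, List.append_assoc]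
    · simp only [List.foldl_cons]
      rw [hdg, h]
      show List.foldl _ [b0, b1, b2, b3, b4, b5 ++ [num], b6, b7, b8, b9] rest = _
      rw [ih]
      simp [h, List.append_assoc]
    · simp only [List.foldl_cons]
      rw [hdg, h]
      show List.foldl _ [b0, b1, b2, b3, b4, b5, b6 ++ [num], b7, b8, b9] rest = _
      rw [ih]
      simp [h, List.append_assoc]
    · simp only [List.foldl_cons]
      rw [hdg, h]
      show List.foldl _ [b0, b1, b2, b3, b4, b5, b6, b7 ++ [num], b8, b9] rest = _
      rw [ih]
      simp [h, List.append_assoc]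
    · simp only [List.foldl_cons]
      rw [hdg, h]
      show List.foldl _ [b0, b1, b2, b3, b4, b5, b6, b7, b8 ++ [num], b9] rest = _
      rw [ih]
      simp [h, List.append_assoc]
    · simp only [List.foldl_cons]
      rw [hdg, h]
      show List.foldl _ [b0, b1, b2, b3, b4, b5, b6, b7, b8, b9 ++ [num]] rest = _
      rw [ih]
      simp [h, List.append_assoc]

lemma pvRange10 : PySem.List.pyRange 0 10 1 = [0, 1, 2, 3, 4, 5, 6, 7, 8, 9] := by decide

-- ===== VERDICT (by name: the statement is the Claim_ definition above) =====
theorem radix_sort_helper_py_spec : Claim_equal_radix_sort_helper_py := by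
  intro lst place _ _
  show radix_sort_helper_py lst place = radix_sort_helper_py_alt lst place
  simp only [radix_sort_helper_py, radix_sort_helper_py_alt]
  rw [pvBinsA ((10:Int) ^ (place - 1).toNat) lst [] [] [] [] [] [] [] [] [] [], pvRange10]
  simp [pvDg, List.foldl_cons, List.append_assoc]
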